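-- pv_equiv track=rewrite | github.com/412984588/clawdh | Documents/cursor/坏蛋系统/local_data_miner.py | is_reasonable_platform
-- ===== SOURCE A (Python) =====
-- def is_reasonable_platform(name: str, domain: str) -> bool:
--     """判断是否是合理的平台"""
--     # 避免无意义组合
--     if len(name) < 4 or len(name) > 20:
--         return False
--
--     # 避免重复字母
--     if any(name.count(c*3) > 0 for c in set(name)):
--         return False
--
--     # 检查是否包含支付相关词汇
--     payment_keywords = ['pay', 'fund', 'donate', 'money', 'cash', 'wallet', 'tip']
--     has_payment = any(k in name.lower() for k in payment_keywords)
--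
--     # 检查是否包含创作者相关词汇
--     creator_keywords = ['creator', 'artist', 'writer', 'maker', 'content', 'fan']
--     has_creator = any(k in name.lower() for k in creator_keywords)
--
--     # 至少要有一种特征
--     return has_payment or has_creator
-- ===== SOURCE B (Python) =====
-- def is_reasonable_platform(name: str, domain: str) -> bool:
--     if not (4 <= len(name) <= 20):
--         return False
--     # single sliding-window pass: reject on any three equal consecutive chars
--     chars = list(name)
--     for a, b, c in zip(chars, chars[1:], chars[2:]):
--         if a == b == c:
--             return False
--     low = name.lower()
--     keywords = ['pay', 'fund', 'donate', 'money', 'cash', 'wallet', 'tip',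
--                 'creator', 'artist', 'writer', 'maker', 'content', 'fan']
--     return any(k in low for k in keywords)
-- ===== Notes on version B (the rewrite author's own statement) =====
-- stated objective: simpler
-- what changed: The repeated-letter test builds set(name) and runs a substring count of c*3 over the whole name for each distinct character; B replaces it with one sliding-window pass over adjacent character triples, and merges the two keyword any-checks into a single any over one keyword list.
import Mathlib
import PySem

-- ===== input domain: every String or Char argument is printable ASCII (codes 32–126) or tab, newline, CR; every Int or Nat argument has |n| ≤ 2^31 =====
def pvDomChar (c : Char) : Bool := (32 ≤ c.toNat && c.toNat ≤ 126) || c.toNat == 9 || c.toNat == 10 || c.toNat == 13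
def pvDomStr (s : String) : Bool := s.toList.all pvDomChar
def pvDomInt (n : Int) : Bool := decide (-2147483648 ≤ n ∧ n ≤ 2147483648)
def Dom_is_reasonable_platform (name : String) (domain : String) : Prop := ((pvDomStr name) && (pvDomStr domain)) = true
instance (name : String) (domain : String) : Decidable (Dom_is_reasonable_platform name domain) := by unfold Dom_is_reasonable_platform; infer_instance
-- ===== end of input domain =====

-- B replaces the per-distinct-char substring-count repeat test by one sliding-window pass
-- over adjacent triples, and merges the two keyword checks into one any (objective: simpler).


-- ===== PORT A =====
def pvPaymentKeywords : List String := ["pay", "fund", "donate", "money", "cash", "wallet", "tip"]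
def pvCreatorKeywords : List String := ["creator", "artist", "writer", "maker", "content", "fan"]

def is_reasonable_platform (name : String) (domain : String) : Bool :=
  if PySem.Str.len name < 4 || PySem.Str.len name > 20 then false
  else if (PySem.Set.ofList name.toList).any
            (fun c => decide (0 < PySem.Chars.count name.toList [c, c, c])) then false
  else
    let has_payment := pvPaymentKeywords.any (fun k => PySem.Str.isIn k (PySem.Str.lower name))
    let has_creator := pvCreatorKeywords.any (fun k => PySem.Str.isIn k (PySem.Str.lower name))
    has_payment || has_creator

-- ===== PORT B =====
-- Source B's sliding window over zip(chars, chars[1:], chars[2:]): structural three-head scan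
def pvTripleScan : List Char → Bool
  | c1 :: c2 :: c3 :: rest =>
      if c1 == c2 && c2 == c3 then true else pvTripleScan (c2 :: c3 :: rest)
  | _ => false

def pvAllKeywords : List String :=
  ["pay", "fund", "donate", "money", "cash", "wallet", "tip",
   "creator", "artist", "writer", "maker", "content", "fan"]

def is_reasonable_platform_alt (name : String) (domain : String) : Bool :=
  if 4 ≤ PySem.Str.len name && PySem.Str.len name ≤ 20 then
    if pvTripleScan name.toList then false
    else pvAllKeywords.any (fun k => PySem.Str.isIn k (PySem.Str.lower name))
  else false

-- ===== PRECONDITION & SPEC =====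
def Spec_is_reasonable_platform (name : String) (domain : String) (out : Bool) : Prop := out = is_reasonable_platform_alt name domain
instance (name : String) (domain : String) (out : Bool) : Decidable (Spec_is_reasonable_platform name domain out) := by unfold Spec_is_reasonable_platform; infer_instance

-- ===== CLAIM (what is proved, stated in full; the proofs are below) =====
def Claim_equal_is_reasonable_platform : Prop := ∀ (name : String) (domain : String), Dom_is_reasonable_platform name domain → Spec_is_reasonable_platform name domain (is_reasonable_platform name domain)

-- ===== LEMMAS AND PROOFS =====

-- count.go never decreases the accumulator
theorem pv_count_go_le (sub : List Char) (fuel : Nat) (l : List Char) (acc : Nat) :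
    acc ≤ PySem.Chars.count.go sub fuel l acc := by
  induction fuel generalizing l acc with
  | zero => simp [PySem.Chars.count.go]
  | succ f ih =>
    cases l with
    | nil => simp [PySem.Chars.count.go]
    | cons h t =>
      rw [PySem.Chars.count.go]
      split
      · exact le_trans (Nat.le_succ acc) (ih _ _)
      · exact ih _ _

-- for nonempty sub and enough fuel, go strictly increases the accumulator iff sub occurs
theorem pv_count_go_pos_iff (sub : List Char) (hsub : sub ≠ []) (fuel : Nat) (l : List Char)
    (hf : l.length ≤ fuel) (acc : Nat) :
    acc < PySem.Chars.count.go sub fuel l acc ↔ sub <:+: l := by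
  induction fuel generalizing l acc with
  | zero =>
    have : l = [] := List.length_eq_zero_iff.mp (Nat.le_zero.mp hf)
    subst this
    simp [PySem.Chars.count.go]
    exact hsub
  | succ f ih =>
    cases l with
    | nil =>
      simp [PySem.Chars.count.go]
      exact hsub
    | cons h t =>
      rw [PySem.Chars.count.go]
      split
      · rename_i hpre
        have hp : sub <+: h :: t := List.isPrefixOf_iff_prefix.mp hpre
        constructor
        · intro _
          exact hp.isInfix
        · intro _
          exact Nat.lt_of_lt_of_le (Nat.lt_succ_self acc) (pv_count_go_le _ _ _ _)
      · rename_i hpre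
        have hlen : t.length ≤ f := Nat.le_of_succ_le_succ (by simpa using hf)
        rw [ih t hlen acc]
        constructor
        · intro hinf; exact hinf.trans (List.suffix_cons h t).isInfix
        · intro hinf
          rcases (List.infix_cons_iff).mp hinf with hp | hi
          · exact absurd (List.isPrefixOf_iff_prefix.mpr hp) (by simpa using hpre)
          · exact hi

-- A's repeat test, characterised: some character occurs three times in a row
theorem pv_count_pos_iff (s : List Char) (c : Char) :
    (0 < PySem.Chars.count s [c, c, c]) ↔ [c, c, c] <:+: s := by
  have := pv_count_go_pos_iff [c, c, c] (by simp) s.length s (le_refl _) 0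
  simpa [PySem.Chars.count] using this

-- B's repeat test, characterised the same way
theorem pv_tripleScan_iff (s : List Char) :
    pvTripleScan s = true ↔ ∃ c, [c, c, c] <:+: s := by
  induction s with
  | nil => simp [pvTripleScan]
  | cons c1 t ih =>
    cases t with
    | nil =>
      simp [pvTripleScan]
      intro c h
      have := h.length_le
      simp at this
    | cons c2 t2 =>
      cases t2 with
      | nil =>
        simp [pvTripleScan]
        intro c h
        have := h.length_le
        simp at this
      | cons c3 rest =>
        rw [pvTripleScan]
        split
        · rename_i h
          simp at h
          obtain ⟨h1, h2⟩ := h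
          subst h1; subst h2
          simp
          exact ⟨c1, ⟨[], by simp⟩⟩
        · rename_i h
          simp at h
          rw [ih]
          constructor
          · rintro ⟨c, hc⟩
            exact ⟨c, hc.trans (List.suffix_cons c1 _).isInfix⟩
          · rintro ⟨c, hc⟩
            rcases List.infix_cons_iff.mp hc with hp | hi
            · exfalso
              rcases hp with ⟨u, hu⟩
              simp at hu
              obtain ⟨e1, e2, e3, -⟩ := hu
              exact h (e1.symm.trans e2) (e2.symm.trans e3)
            · exact ⟨c, hi⟩

-- ===== VERDICT (by name: the statement is the Claim_ definition above) =====
theorem is_reasonable_platform_spec : Claim_equal_is_reasonable_platform := by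
  intro name domain _
  unfold Spec_is_reasonable_platform is_reasonable_platform is_reasonable_platform_alt
  by_cases hlen : (PySem.Str.len name < 4 || PySem.Str.len name > 20) = true
  · have h2 : ¬ ((4 ≤ PySem.Str.len name && PySem.Str.len name ≤ 20) = true) := by
      simp at hlen ⊢
      omega
    rw [if_pos hlen, if_neg h2]
  · have h2 : (4 ≤ PySem.Str.len name && PySem.Str.len name ≤ 20) = true := by
      simp at hlen ⊢
      omega
    have htrip : ((PySem.Set.ofList name.toList).any
        (fun c => decide (0 < PySem.Chars.count name.toList [c, c, c]))) = pvTripleScan name.toList := by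
      rw [Bool.eq_iff_iff, List.any_eq_true, pv_tripleScan_iff]
      constructor
      · rintro ⟨c, hc, hp⟩
        exact ⟨c, (pv_count_pos_iff _ _).mp (by simpa using hp)⟩
      · rintro ⟨c, hc⟩
        refine ⟨c, ?_, by simpa using (pv_count_pos_iff _ _).mpr hc⟩
        rw [PySem.Set.mem_ofList]
        exact hc.subset (by simp)
    rw [if_neg hlen, if_pos h2, htrip]
    cases pvTripleScan name.toList
    · simp only [Bool.false_eq_true, if_false]
      rw [show pvAllKeywords = pvPaymentKeywords ++ pvCreatorKeywords from rfl, List.any_append]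
    · simp
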